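-- pv_equiv track=rewrite | github.com/parkerjbeard/golfdaddy-brain-mono | backend/app/services/house_style.py | _apply_american_spelling
-- ===== SOURCE A (Python) =====
-- def _apply_american_spelling(text: str) -> str:
--     """Convert British spelling to American spelling.
--
--     Args:
--         text: Text to convert
--
--     Returns:
--         Text with American spelling
--     """
--     british_to_american = {
--         "colour": "color",
--         "flavour": "flavor",
--         "honour": "honor",
--         "labour": "labor",
--         "neighbour": "neighbor",
--         "centre": "center",
--         "metre": "meter",
--         "theatre": "theater",
--         "defence": "defense",
--         "licence": "license",
--         "offence": "offense",
--         "pretence": "pretense",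
--         "organise": "organize",
--         "recognise": "recognize",
--         "analyse": "analyze",
--         "paralyse": "paralyze",
--         "catalogue": "catalog",
--         "dialogue": "dialog",
--         "programme": "program",
--     }
--
--     result = text
--     for british, american in british_to_american.items():
--         result = result.replace(british, american)
--         result = result.replace(british.capitalize(), american.capitalize())
--
--     return result
-- ===== SOURCE B (Python) =====
-- # Table-driven rewrite: one flat table of 38 (pattern, replacement) pairs (capitalized
-- # forms precomputed as literals) and a hand-written left-to-right scan per pair instead
-- # of calls to str.replace on a dict built each call.
--
-- _PAIRS = (
--     ("colour", "color"), ("Colour", "Color"),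
--     ("flavour", "flavor"), ("Flavour", "Flavor"),
--     ("honour", "honor"), ("Honour", "Honor"),
--     ("labour", "labor"), ("Labour", "Labor"),
--     ("neighbour", "neighbor"), ("Neighbour", "Neighbor"),
--     ("centre", "center"), ("Centre", "Center"),
--     ("metre", "meter"), ("Metre", "Meter"),
--     ("theatre", "theater"), ("Theatre", "Theater"),
--     ("defence", "defense"), ("Defence", "Defense"),
--     ("licence", "license"), ("Licence", "License"),
--     ("offence", "offense"), ("Offence", "Offense"),
--     ("pretence", "pretense"), ("Pretence", "Pretense"),
--     ("organise", "organize"), ("Organise", "Organize"),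
--     ("recognise", "recognize"), ("Recognise", "Recognize"),
--     ("analyse", "analyze"), ("Analyse", "Analyze"),
--     ("paralyse", "paralyze"), ("Paralyse", "Paralyze"),
--     ("catalogue", "catalog"), ("Catalogue", "Catalog"),
--     ("dialogue", "dialog"), ("Dialogue", "Dialog"),
--     ("programme", "program"), ("Programme", "Program"),
-- )
--
--
-- def _apply_american_spelling(text: str) -> str:
--     for old, new in _PAIRS:
--         parts = []
--         i = 0
--         n = len(text)
--         while i < n:
--             if text.startswith(old, i):
--                 parts.append(new)
--                 i += len(old)
--             else:
--                 parts.append(text[i])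
--                 i += 1
--         text = "".join(parts)
--     return text
-- ===== Notes on version B (the rewrite author's own statement) =====
-- stated objective: alternative
-- what changed: Replaces the per-call dict plus 38 str.replace/str.capitalize library calls with one precomputed flat table of 38 literal (pattern, replacement) pairs and a hand-written left-to-right startswith scan that builds each pass's output explicitly.
import Mathlib
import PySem

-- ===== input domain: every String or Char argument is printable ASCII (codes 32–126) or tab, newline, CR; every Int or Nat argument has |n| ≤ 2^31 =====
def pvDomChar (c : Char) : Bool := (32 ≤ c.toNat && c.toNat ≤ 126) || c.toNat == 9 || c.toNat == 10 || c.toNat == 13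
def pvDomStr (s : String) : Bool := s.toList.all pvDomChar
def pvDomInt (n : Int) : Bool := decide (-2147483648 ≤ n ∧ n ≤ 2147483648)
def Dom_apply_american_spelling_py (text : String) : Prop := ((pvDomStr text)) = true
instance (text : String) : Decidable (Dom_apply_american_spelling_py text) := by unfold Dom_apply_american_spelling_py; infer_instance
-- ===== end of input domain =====

-- B replaces A's 38 sequential str.replace calls (19 dict entries × 2 case forms, capitalized at
-- run time) by one flat literal table of 38 pairs and a hand-written left-to-right scan per pair
-- (objective: alternative; no speed claim).

-- ===== PORT A =====

-- str.capitalize(): first char upper, rest lower — exact on the ASCII domain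
def pyCapitalize (s : String) : String :=
  match s.toList with
  | [] => ""
  | c :: t => String.ofList (PySem.Chars.upper [c] ++ PySem.Chars.lower t)

def britishToAmerican : PySem.Dict String String := PySem.Dict.ofList
  [("colour", "color"), ("flavour", "flavor"), ("honour", "honor"), ("labour", "labor"),
   ("neighbour", "neighbor"), ("centre", "center"), ("metre", "meter"), ("theatre", "theater"),
   ("defence", "defense"), ("licence", "license"), ("offence", "offense"), ("pretence", "pretense"),
   ("organise", "organize"), ("recognise", "recognize"), ("analyse", "analyze"),
   ("paralyse", "paralyze"), ("catalogue", "catalog"), ("dialogue", "dialog"),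
   ("programme", "program")]

def apply_american_spelling_py (text : String) : String :=
  britishToAmerican.items.foldl
    (fun result p =>
      let r1 := PySem.Str.replace result p.1 p.2
      PySem.Str.replace r1 (pyCapitalize p.1) (pyCapitalize p.2))
    text

-- ===== PORT B =====

-- B's inner while loop: scan the remaining characters, emitting `new` and skipping the
-- pattern `o :: os` where it is a prefix, else copying the character
def scanRepl (o : Char) (os new : List Char) : List Char → List Char
  | [] => []
  | c :: t =>
    if (o :: os).isPrefixOf (c :: t) then new ++ scanRepl o os new (t.drop os.length)
    else c :: scanRepl o os new t
termination_by s => s.length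
decreasing_by
  · simp only [List.length_cons]
    exact Nat.lt_succ_of_le (by simp)
  · simp

-- one (old, new) pass of B over the text (the [] arm is a totality guard; every table key is nonempty)
def replOnce (old new t : String) : String :=
  match old.toList with
  | [] => t
  | o :: os => String.ofList (scanRepl o os new.toList t.toList)

def bPairs : List (String × String) :=
  [("colour", "color"), ("Colour", "Color"),
   ("flavour", "flavor"), ("Flavour", "Flavor"),
   ("honour", "honor"), ("Honour", "Honor"),
   ("labour", "labor"), ("Labour", "Labor"),
   ("neighbour", "neighbor"), ("Neighbour", "Neighbor"),
   ("centre", "center"), ("Centre", "Center"),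
   ("metre", "meter"), ("Metre", "Meter"),
   ("theatre", "theater"), ("Theatre", "Theater"),
   ("defence", "defense"), ("Defence", "Defense"),
   ("licence", "license"), ("Licence", "License"),
   ("offence", "offense"), ("Offence", "Offense"),
   ("pretence", "pretense"), ("Pretence", "Pretense"),
   ("organise", "organize"), ("Organise", "Organize"),
   ("recognise", "recognize"), ("Recognise", "Recognize"),
   ("analyse", "analyze"), ("Analyse", "Analyze"),
   ("paralyse", "paralyze"), ("Paralyse", "Paralyze"),
   ("catalogue", "catalog"), ("Catalogue", "Catalog"),
   ("dialogue", "dialog"), ("Dialogue", "Dialog"),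
   ("programme", "program"), ("Programme", "Program")]

def apply_american_spelling_py_alt (text : String) : String :=
  bPairs.foldl (fun t p => replOnce p.1 p.2 t) text

-- ===== PRECONDITION & SPEC =====
def Spec_apply_american_spelling_py (text : String) (out : String) : Prop := out = apply_american_spelling_py_alt text
instance (text : String) (out : String) : Decidable (Spec_apply_american_spelling_py text out) := by unfold Spec_apply_american_spelling_py; infer_instance

-- ===== CLAIM (what is proved, stated in full; the proofs are below) =====
def Claim_equal_apply_american_spelling_py : Prop := ∀ (text : String), Dom_apply_american_spelling_py text → Spec_apply_american_spelling_py text (apply_american_spelling_py text)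

-- ===== LEMMAS AND PROOFS =====

-- PySem.Chars.replace's fuel scan with accumulator equals B's structural scan (nonempty pattern)
lemma go_eq_scanRepl (o : Char) (os new : List Char) :
    ∀ (fuel : Nat) (l acc : List Char), l.length ≤ fuel →
      PySem.Chars.replace.go (o :: os) new fuel l acc = acc.reverse ++ scanRepl o os new l := by
  intro fuel
  induction fuel with
  | zero =>
    intro l acc h
    have : l = [] := List.eq_nil_of_length_eq_zero (Nat.le_zero.mp h)
    subst this
    simp [PySem.Chars.replace.go, scanRepl]
  | succ n ih =>
    intro l acc h
    cases l with
    | nil => simp [PySem.Chars.replace.go, scanRepl]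
    | cons c t =>
      rw [PySem.Chars.replace.go]
      simp only [List.length_cons, Nat.succ_le_succ_iff] at h
      by_cases hp : (o :: os).isPrefixOf (c :: t)
      · simp only [hp, if_true]
        have hd : (List.drop (o :: os).length (c :: t)) = t.drop os.length := by simp
        rw [hd, ih _ _ (by simp; omega), scanRepl]
        simp [hp]
      · simp only [hp]
        rw [if_neg (by simp [hp]), ih _ _ h, scanRepl]
        simp [hp]

-- one str.replace call of A is one pass of B
lemma replace_eq_replOnce (old new t : String) (h : old.toList ≠ []) :
    PySem.Str.replace t old new = replOnce old new t := by
  obtain ⟨o, os, ho⟩ : ∃ o os, old.toList = o :: os := by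
    cases hl : old.toList with
    | nil => exact absurd hl h
    | cons a b => exact ⟨a, b, rfl⟩
  rw [PySem.Str.replace, PySem.Chars.replace, replOnce, ho]
  rw [if_neg (by simp)]
  rw [go_eq_scanRepl o os new.toList t.toList.length t.toList [] (le_refl _)]
  simp

-- each A-step (lowercase replace, then capitalized replace) is two consecutive B-steps
lemma fold_flat (ps : List (String × String)) :
    (∀ p ∈ ps, p.1.toList ≠ [] ∧ (pyCapitalize p.1).toList ≠ []) →
    ∀ t : String,
      ps.foldl (fun result p =>
          let r1 := PySem.Str.replace result p.1 p.2
          PySem.Str.replace r1 (pyCapitalize p.1) (pyCapitalize p.2)) t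
      = (ps.flatMap (fun p => [(p.1, p.2), (pyCapitalize p.1, pyCapitalize p.2)])).foldl
          (fun t p => replOnce p.1 p.2 t) t := by
  induction ps with
  | nil => intro _ t; rfl
  | cons p ps ih =>
    intro h t
    obtain ⟨h1, h2⟩ := h p (List.mem_cons_self ..)
    simp only [List.foldl_cons, List.flatMap_cons, List.foldl_append]
    rw [← ih (fun q hq => h q (List.mem_cons_of_mem _ hq))]
    congr 1
    simp only [List.foldl_nil]
    rw [replace_eq_replOnce _ _ _ h1, replace_eq_replOnce _ _ _ h2]

-- flattening A's 19-entry table with its capitalized forms gives exactly B's 38-entry table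
lemma flat_table_eq :
    britishToAmerican.items.flatMap
      (fun p => [(p.1, p.2), (pyCapitalize p.1, pyCapitalize p.2)]) = bPairs := by decide

lemma table_keys_nonempty :
    ∀ p ∈ britishToAmerican.items, p.1.toList ≠ [] ∧ (pyCapitalize p.1).toList ≠ [] := by decide

-- ===== VERDICT (by name: the statement is the Claim_ definition above) =====
theorem apply_american_spelling_py_spec : Claim_equal_apply_american_spelling_py := by
  intro text _
  unfold Spec_apply_american_spelling_py apply_american_spelling_py apply_american_spelling_py_alt
  rw [fold_flat _ table_keys_nonempty, flat_table_eq]
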